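-- pv_equiv track=rewrite | github.com/niyaznigmatullin/kex | get_crashing.py | has_exception_happened
-- ===== SOURCE A (Python) =====
-- def has_exception_happened(lines):
--     index = len(lines) - 1
--     while index >= 0 and lines[index].find("Analyzed klass") < 0:
--         index -= 1
--     index -= 1
--     if index < 0:
--         return False
--     if lines[index].startswith("\tat"):
--         return True
--     return False
-- ===== SOURCE B (Python) =====
-- def has_exception_happened(lines):
--     result = False
--     for i, line in enumerate(lines):
--         if "Analyzed klass" in line:
--             result = i > 0 and lines[i - 1].startswith("\tat")
--     return result
-- ===== Notes on version B (the rewrite author's own statement) =====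
-- stated objective: alternative
-- what changed: Replaced the backward while-loop search for the last 'Analyzed klass' marker followed by a separate index check with a single forward pass that overwrites an accumulator verdict at every marker line.
import Mathlib
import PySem

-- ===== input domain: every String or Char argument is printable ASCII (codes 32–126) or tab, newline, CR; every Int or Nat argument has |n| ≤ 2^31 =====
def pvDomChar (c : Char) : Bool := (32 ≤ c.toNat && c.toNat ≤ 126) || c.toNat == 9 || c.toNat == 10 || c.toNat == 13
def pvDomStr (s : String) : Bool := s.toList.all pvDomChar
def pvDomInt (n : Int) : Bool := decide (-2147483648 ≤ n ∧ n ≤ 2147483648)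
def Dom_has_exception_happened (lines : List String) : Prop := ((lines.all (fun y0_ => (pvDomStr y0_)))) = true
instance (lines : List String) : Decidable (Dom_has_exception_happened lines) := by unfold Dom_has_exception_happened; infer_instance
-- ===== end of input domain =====

-- B replaces A's backward search for the last "Analyzed klass" marker (then a separate
-- previous-line check) with a single forward pass that overwrites an accumulator verdict
-- at every marker line; same values everywhere (objective: alternative decomposition).


-- ===== PORT A =====
-- the backward 'while index >= 0 and lines[index].find("Analyzed klass") < 0: index -= 1' loop;
-- lines[index] is only read with 0 ≤ index < len lines, so pyGetD is exact here
def aLoop (lines : List String) (index : Int) : Int :=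
  if _h : 0 ≤ index then
    if PySem.Str.find (PySem.List.pyGetD lines index "") "Analyzed klass" < 0 then
      aLoop lines (index - 1)
    else index
  else index
termination_by (index + 1).toNat
decreasing_by omega

def has_exception_happened (lines : List String) : Bool :=
  let index := aLoop lines ((lines.length : Int) - 1) - 1
  if index < 0 then false
  else PySem.Str.startswith (PySem.List.pyGetD lines index "") "\tat"

-- ===== PORT B =====
def has_exception_happened_alt (lines : List String) : Bool :=
  (PySem.List.enumerate lines 0).foldl
    (fun result p =>
      if PySem.Str.isIn "Analyzed klass" p.2 then
        decide (p.1 > 0) && PySem.Str.startswith (PySem.List.pyGetD lines (p.1 - 1) "") "\tat"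
      else result)
    false

-- ===== PRECONDITION & SPEC =====
def Spec_has_exception_happened (lines : List String) (out : Bool) : Prop := out = has_exception_happened_alt lines
instance (lines : List String) (out : Bool) : Decidable (Spec_has_exception_happened lines out) := by unfold Spec_has_exception_happened; infer_instance

-- ===== CLAIM (what is proved, stated in full; the proofs are below) =====
def Claim_equal_has_exception_happened : Prop := ∀ (lines : List String), Dom_has_exception_happened lines → Spec_has_exception_happened lines (has_exception_happened lines)

-- ===== LEMMAS AND PROOFS =====

theorem pyGetD_append_lt (ys : List String) (l : String) (j : Int)
    (h0 : 0 ≤ j) (h1 : j < (ys.length : Int)) :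
    PySem.List.pyGetD (ys ++ [l]) j "" = PySem.List.pyGetD ys j "" := by
  rw [PySem.List.pyGetD_eq_getElem _ _ h0 (by simp; omega),
      PySem.List.pyGetD_eq_getElem _ _ h0 h1,
      List.getElem_append_left (by omega)]

theorem aLoop_bounds (lines : List String) (j : Int) (h : -1 ≤ j) :
    -1 ≤ aLoop lines j ∧ aLoop lines j ≤ j := by
  fun_induction aLoop lines j with
  | case1 j hj hfind ih => exact ⟨(ih (by omega)).1, by omega⟩
  | case2 j hj hfind => omega
  | case3 j hj => omega

theorem aLoop_append (ys : List String) (l : String) (j : Int)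
    (hj : j < (ys.length : Int)) :
    aLoop (ys ++ [l]) j = aLoop ys j := by
  fun_induction aLoop (ys ++ [l]) j with
  | case1 j hj' hfind ih =>
    rw [ih (by omega)]
    conv_rhs => rw [aLoop]
    rw [dif_pos hj', if_pos (by rwa [pyGetD_append_lt ys l j hj' hj] at hfind)]
  | case2 j hj' hfind =>
    conv_rhs => rw [aLoop]
    rw [dif_pos hj', if_neg (by rwa [pyGetD_append_lt ys l j hj' hj] at hfind)]
  | case3 j hj' =>
    conv_rhs => rw [aLoop]
    rw [dif_neg hj']

-- the forward fold over a prefix does not depend on the appended last element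
theorem alt_fold_append (ys : List String) (l : String) (init : Bool) :
    (PySem.List.enumerate ys 0).foldl
      (fun result p =>
        if PySem.Str.isIn "Analyzed klass" p.2 then
          decide (p.1 > 0) && PySem.Str.startswith (PySem.List.pyGetD (ys ++ [l]) (p.1 - 1) "") "\tat"
        else result) init
    = (PySem.List.enumerate ys 0).foldl
      (fun result p =>
        if PySem.Str.isIn "Analyzed klass" p.2 then
          decide (p.1 > 0) && PySem.Str.startswith (PySem.List.pyGetD ys (p.1 - 1) "") "\tat"
        else result) init := by
  apply PySem.List.foldl_congr_mem
  intro acc p hp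
  rcases (PySem.List.mem_enumerate_iff _ _ _).1 hp with ⟨k, hk, rfl⟩
  by_cases hm : PySem.Str.isIn "Analyzed klass" ys[k] = true
  · simp only [hm, if_pos]
    rcases Nat.eq_zero_or_pos k with hk0 | hk0
    · subst hk0; simp
    · rw [pyGetD_append_lt ys l _ (by omega) (by omega)]
  · simp only [hm, Bool.false_eq_true, if_false]

theorem marker_iff (l : String) :
    PySem.Str.isIn "Analyzed klass" l = true ↔ ¬ PySem.Str.find l "Analyzed klass" < 0 := by
  rw [PySem.Str.isIn_iff_infix, ← PySem.Str.find_nonneg_iff]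
  omega

theorem has_exception_happened_spec : Claim_equal_has_exception_happened := by
  unfold Claim_equal_has_exception_happened
  intro lines hdom
  unfold Spec_has_exception_happened
  induction lines using List.reverseRecOn with
  | nil =>
    unfold has_exception_happened has_exception_happened_alt
    rw [aLoop]
    norm_num [PySem.List.enumerate_nil]
  | append_singleton ys l ih =>
    have hdom' : Dom_has_exception_happened ys := by
      unfold Dom_has_exception_happened at hdom ⊢
      simp only [List.all_append, Bool.and_eq_true] at hdom
      exact hdom.1
    have key := ih hdom'
    have hlast : PySem.List.pyGetD (ys ++ [l]) (ys.length : Int) "" = l := by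
      rw [PySem.List.pyGetD_eq_getElem _ _ (by omega) (by simp)]
      simp
    have hlen : (((ys ++ [l]).length : Int)) - 1 = (ys.length : Int) := by simp
    -- the final fold step of B: overwrite at a marker, keep the prefix verdict otherwise
    have halt : has_exception_happened_alt (ys ++ [l]) =
        (if PySem.Str.isIn "Analyzed klass" l = true then
           decide ((ys.length : Int) > 0) &&
             PySem.Str.startswith (PySem.List.pyGetD (ys ++ [l]) ((ys.length : Int) - 1) "") "\tat"
         else has_exception_happened_alt ys) := by
      unfold has_exception_happened_alt
      rw [PySem.List.enumerate_append, List.foldl_append, PySem.List.enumerate_cons,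
          PySem.List.enumerate_nil]
      simp only [List.foldl_cons, List.foldl_nil, zero_add]
      by_cases hm : PySem.Str.isIn "Analyzed klass" l = true
      · rw [if_pos hm, if_pos hm]
      · rw [if_neg hm, if_neg hm, alt_fold_append]
    -- the first step of A's backward loop: stop at a marker, else scan the prefix
    have haLoop : aLoop (ys ++ [l]) (ys.length : Int) =
        (if PySem.Str.isIn "Analyzed klass" l = true then (ys.length : Int)
         else aLoop ys ((ys.length : Int) - 1)) := by
      rw [aLoop, dif_pos (by omega), hlast]
      by_cases hm : PySem.Str.find l "Analyzed klass" < 0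
      · rw [if_pos hm, if_neg (by rw [marker_iff]; omega),
            aLoop_append ys l _ (by omega)]
      · rw [if_neg hm, if_pos ((marker_iff l).2 hm)]
    unfold has_exception_happened
    rw [halt, hlen, haLoop]
    by_cases hm : PySem.Str.isIn "Analyzed klass" l = true
    · rw [if_pos hm, if_pos hm]
      by_cases hz : ys.length = 0
      · simp [hz]
      · rw [if_neg (by omega)]
        have : decide ((ys.length : Int) > 0) = true := by simp; omega
        rw [this, Bool.true_and]
    · rw [if_neg hm, if_neg hm, ← key]
      unfold has_exception_happened
      have hb := aLoop_bounds ys ((ys.length : Int) - 1) (by omega)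
      by_cases hz : aLoop ys ((ys.length : Int) - 1) - 1 < 0
      · simp only [if_pos hz]
      · simp only [if_neg hz]
        rw [pyGetD_append_lt ys l _ (by omega) (by omega)]
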